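-- pv_equiv track=rewrite | github.com/Gabriel-Kahen/eshkol-jupyter-kernel | src/eshkol_kernel/session.py | remove_echoed_input
-- ===== SOURCE A (Python) =====
-- from collections.abc import Sequence
--
-- def remove_echoed_input(output: str, sent_forms: Sequence[str]) -> str:
--     lines = output.splitlines()
--     echoes: list[str] = []
--     for form in sent_forms:
--         echoes.extend(line.strip() for line in form.splitlines() if line.strip())
--
--     for echo in echoes:
--         for index, line in enumerate(lines):
--             if line.strip() == echo:
--                 del lines[index]
--                 break
--
--     while lines and not lines[0].strip():
--         lines.pop(0)
--     while lines and not lines[-1].strip():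
--         lines.pop()
--     return "\n".join(lines)
-- ===== SOURCE B (Python) =====
-- def remove_echoed_input(output, sent_forms):
--     # Count each stripped non-empty echo line once, then delete matches in
--     # a single pass over the output lines (first occurrences first).
--     cnt = {}
--     for form in sent_forms:
--         for line in form.splitlines():
--             s = line.strip()
--             if s:
--                 cnt[s] = cnt.get(s, 0) + 1
--     kept = []
--     for line in output.splitlines():
--         s = line.strip()
--         c = cnt.get(s, 0)
--         if c:
--             cnt[s] = c - 1
--         else:
--             kept.append(line)
--     while kept and not kept[0].strip():
--         kept.pop(0)
--     while kept and not kept[-1].strip():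
--         kept.pop()
--     return "\n".join(kept)
-- ===== Notes on version B (the rewrite author's own statement) =====
-- stated objective: faster
-- what changed: Replaces the per-echo linear scan over the output lines (delete-first-match for every echo) with a counter keyed by stripped line value built once from sent_forms plus a single pass over the output lines that drops a line while its count is positive.
import Mathlib
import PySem

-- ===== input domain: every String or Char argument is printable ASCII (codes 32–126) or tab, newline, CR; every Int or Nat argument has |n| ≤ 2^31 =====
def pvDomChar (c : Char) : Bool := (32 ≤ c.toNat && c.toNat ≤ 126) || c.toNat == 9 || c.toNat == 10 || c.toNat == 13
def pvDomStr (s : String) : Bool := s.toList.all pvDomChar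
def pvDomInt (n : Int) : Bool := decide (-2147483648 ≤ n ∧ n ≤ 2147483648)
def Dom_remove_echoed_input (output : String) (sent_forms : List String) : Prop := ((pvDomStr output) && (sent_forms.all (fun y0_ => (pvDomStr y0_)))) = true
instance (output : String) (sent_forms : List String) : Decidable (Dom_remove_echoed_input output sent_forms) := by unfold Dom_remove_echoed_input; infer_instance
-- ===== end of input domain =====

-- B replaces A's per-echo scan-and-delete over the output lines by a counter of
-- stripped echo lines and one pass over the output lines (faster; return value only).

-- ===== PORT A =====
-- inner 'for index, line in enumerate(lines): if …: del lines[index]; break'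
def pvDelFirst : List String → String → List String
  | [], _ => []
  | l :: ls, echo => if PySem.Str.strip l == echo then ls else l :: pvDelFirst ls echo

-- 'while lines and not lines[0].strip(): lines.pop(0)'
def pvTrimLead : List String → List String
  | [] => []
  | l :: ls => if PySem.Str.strip l == "" then pvTrimLead ls else l :: ls

-- 'while lines and not lines[-1].strip(): lines.pop()'
def pvTrimTrail : List String → List String
  | [] => []
  | l :: ls =>
    match pvTrimTrail ls with
    | [] => if PySem.Str.strip l == "" then [] else [l]
    | r => l :: r

def remove_echoed_input (output : String) (sent_forms : List String) : String :=
  let lines := PySem.Str.splitlines output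
  let echoes := sent_forms.foldl (fun acc form =>
      acc ++ ((PySem.Str.splitlines form).filter
                (fun l => PySem.Str.strip l != "")).map PySem.Str.strip) []
  let lines := echoes.foldl pvDelFirst lines
  let lines := pvTrimTrail (pvTrimLead lines)
  PySem.Str.join "\n" lines

-- ===== PORT B =====
-- 'for form in sent_forms: for line in form.splitlines(): … cnt[s] = cnt.get(s,0)+1'
def pvCount (sent_forms : List String) : PySem.Dict String Int :=
  sent_forms.foldl (fun cnt form =>
    (PySem.Str.splitlines form).foldl (fun cnt line =>
      let s := PySem.Str.strip line
      if s == "" then cnt else cnt.insert s (cnt.getD s 0 + 1)) cnt) PySem.Dict.empty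

-- 'for line in output.splitlines(): …' single pass, decrementing the counter
def pvKeep (cnt : PySem.Dict String Int) : List String → List String
  | [] => []
  | l :: ls =>
    let s := PySem.Str.strip l
    let c := cnt.getD s 0
    if c ≠ 0 then pvKeep (cnt.insert s (c - 1)) ls
    else l :: pvKeep cnt ls

def remove_echoed_input_alt (output : String) (sent_forms : List String) : String :=
  let kept := pvKeep (pvCount sent_forms) (PySem.Str.splitlines output)
  let kept := pvTrimTrail (pvTrimLead kept)
  PySem.Str.join "\n" kept

-- ===== PRECONDITION & SPEC =====
def Spec_remove_echoed_input (output : String) (sent_forms : List String) (out : String) : Prop := out = remove_echoed_input_alt output sent_forms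
instance (output : String) (sent_forms : List String) (out : String) : Decidable (Spec_remove_echoed_input output sent_forms out) := by unfold Spec_remove_echoed_input; infer_instance

-- ===== CLAIM (what is proved, stated in full; the proofs are below) =====
def Claim_equal_remove_echoed_input : Prop := ∀ (output : String) (sent_forms : List String), Dom_remove_echoed_input output sent_forms → Spec_remove_echoed_input output sent_forms (remove_echoed_input output sent_forms)

-- ===== LEMMAS AND PROOFS =====

-- abstract version of pvKeep over a Nat-valued count function
def pvKeepF (f : String → Nat) : List String → List String
  | [] => []
  | l :: ls =>
    if f (PySem.Str.strip l) ≠ 0 then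
      pvKeepF (fun t => if t = PySem.Str.strip l then f t - 1 else f t) ls
    else l :: pvKeepF f ls

theorem pvKeep_eq_keepF (ls : List String) : ∀ (cnt : PySem.Dict String Int) (f : String → Nat),
    (∀ s, cnt.getD s 0 = (f s : Int)) → pvKeep cnt ls = pvKeepF f ls := by
  induction ls with
  | nil => intro cnt f h; rfl
  | cons l ls ih =>
    intro cnt f h
    simp only [pvKeep, pvKeepF, h (PySem.Str.strip l)]
    by_cases h0 : f (PySem.Str.strip l) = 0
    · simp [h0, ih cnt f h]
    · have hne : ((f (PySem.Str.strip l) : Int)) ≠ 0 := by exact_mod_cast h0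
      simp only [hne, h0, if_pos, ne_eq, not_false_iff]
      apply ih
      intro t
      rw [PySem.Dict.getD_insert]
      by_cases ht : t = PySem.Str.strip l
      · simp [ht]; omega
      · simp [ht, h t]

theorem pvKeepF_zero (ls : List String) : pvKeepF (fun _ => 0) ls = ls := by
  induction ls with
  | nil => rfl
  | cons l ls ih => simp [pvKeepF, ih]

-- key step: bumping the count of e by one = deleting the first line stripping to e
theorem pvKeepF_bump (ls : List String) : ∀ (f : String → Nat) (e : String),
    pvKeepF (fun t => if t = e then f t + 1 else f t) ls = pvKeepF f (pvDelFirst ls e) := by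
  induction ls with
  | nil => intro f e; rfl
  | cons l ls ih =>
    intro f e
    by_cases hse : PySem.Str.strip l = e
    · simp only [pvKeepF, pvDelFirst, hse, beq_self_eq_true, if_pos,
        Nat.succ_ne_zero, ne_eq, not_false_iff]
      have : (fun t => if t = e then (if t = e then f t + 1 else f t) - 1
                       else (if t = e then f t + 1 else f t)) = f := by
        funext t; by_cases ht : t = e <;> simp [ht]
      rw [this]
    · have hbeq : (PySem.Str.strip l == e) = false := by simp [hse]
      have hb : (if PySem.Str.strip l = e then f (PySem.Str.strip l) + 1
                 else f (PySem.Str.strip l)) = f (PySem.Str.strip l) := by simp [hse]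
      simp only [pvKeepF, pvDelFirst, hbeq, Bool.false_eq_true, if_false, hb]
      by_cases h0 : f (PySem.Str.strip l) = 0
      · simp only [h0, ne_eq, not_true_eq_false, if_false]
        rw [ih]
      · simp only [ne_eq, h0, not_false_iff, if_true]
        have : (fun t => if t = PySem.Str.strip l
                  then (if t = e then f t + 1 else f t) - 1
                  else (if t = e then f t + 1 else f t))
             = (fun t => if t = e then (if t = PySem.Str.strip l then f t - 1 else f t) + 1
                         else (if t = PySem.Str.strip l then f t - 1 else f t)) := by
          funext t
          by_cases h1 : t = PySem.Str.strip l <;> by_cases h2 : t = e <;>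
            simp_all
        rw [this, ih]

-- counting the echoes and filtering once = deleting first matches echo by echo
theorem pvKeepF_count (echoes : List String) : ∀ (lines : List String),
    pvKeepF (fun s => echoes.count s) lines = echoes.foldl pvDelFirst lines := by
  induction echoes with
  | nil => intro lines; simpa using pvKeepF_zero lines
  | cons e es ih =>
    intro lines
    have hfun : (fun s => (e :: es).count s)
        = (fun t => if t = e then es.count t + 1 else es.count t) := by
      funext s
      rw [List.count_cons]
      by_cases hs : s = e
      · simp [hs]
      · have he' : (e == s) = false := by
          simp only [beq_eq_false_iff_ne, ne_eq]
          exact fun h => hs h.symm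
        simp [hs, he']
    rw [hfun, pvKeepF_bump, ih]
    rfl

-- B's nested counting loop, characterised pointwise
theorem pvCount_inner (forms : List String) : ∀ (d : PySem.Dict String Int),
    forms.foldl (fun cnt form =>
      (PySem.Str.splitlines form).foldl (fun cnt line =>
        let s := PySem.Str.strip line
        if s == "" then cnt else cnt.insert s (cnt.getD s 0 + 1)) cnt) d
    = (forms.flatMap (fun form =>
        ((PySem.Str.splitlines form).filter
          (fun l => PySem.Str.strip l != "")).map PySem.Str.strip)).foldl
        (fun cnt s => cnt.insert s (cnt.getD s 0 + 1)) d := by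
  induction forms with
  | nil => intro d; rfl
  | cons form fs ih =>
    intro d
    simp only [List.foldl_cons, List.flatMap_cons, List.foldl_append]
    rw [ih]
    congr 1
    generalize PySem.Str.splitlines form = lns
    induction lns generalizing d with
    | nil => rfl
    | cons l ls ihl =>
      by_cases h : PySem.Str.strip l = ""
      · simp only [List.foldl_cons, List.filter_cons, h, bne_self_eq_false,
          Bool.false_eq_true, if_false, beq_self_eq_true, if_true]
        exact ihl d
      · have : (PySem.Str.strip l != "") = true := by simp [h]
        simp only [List.foldl_cons, List.filter_cons, this, if_true, List.map_cons]
        have hbeq : (PySem.Str.strip l == "") = false := by simp [h]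
        simp only [hbeq, Bool.false_eq_true, if_false]
        exact ihl _

-- A's echoes accumulator is the same flattened list
theorem echoes_eq_flatMap (forms : List String)
    (g : String → List String) : ∀ (acc : List String),
    forms.foldl (fun acc form => acc ++ g form) acc = acc ++ forms.flatMap g := by
  induction forms with
  | nil => intro acc; simp
  | cons f fs ih => intro acc; simp [List.foldl_cons, ih, List.flatMap_cons]

theorem core_eq (output : String) (sent_forms : List String) :
    pvKeep (pvCount sent_forms) (PySem.Str.splitlines output)
    = (sent_forms.foldl (fun acc form =>
        acc ++ ((PySem.Str.splitlines form).filter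
          (fun l => PySem.Str.strip l != "")).map PySem.Str.strip) []).foldl pvDelFirst
        (PySem.Str.splitlines output) := by
  set g : String → List String := fun form =>
    ((PySem.Str.splitlines form).filter (fun l => PySem.Str.strip l != "")).map PySem.Str.strip
  have he : sent_forms.foldl (fun acc form => acc ++ g form) [] = sent_forms.flatMap g := by
    simpa using echoes_eq_flatMap sent_forms g []
  rw [he, ← pvKeepF_count]
  apply pvKeep_eq_keepF
  intro s
  show (pvCount sent_forms).getD s 0 = _
  unfold pvCount
  rw [pvCount_inner]
  rw [PySem.Dict.getD_foldl_insert_add_one, PySem.Dict.getD_empty, zero_add]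

-- ===== VERDICT (by name: the statement is the Claim_ definition above) =====
theorem remove_echoed_input_spec : Claim_equal_remove_echoed_input := by
  intro output sent_forms _
  show remove_echoed_input output sent_forms = remove_echoed_input_alt output sent_forms
  unfold remove_echoed_input remove_echoed_input_alt
  rw [core_eq]
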